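-- pv_equiv track=rewrite | github.com/Grumbel/scatterbackup | scatterbackup/locate.py | make_case_insensitive
-- ===== SOURCE A (Python) =====
-- def make_case_insensitive(pattern):
--     result = ""
--     in_class = False
--     for c in pattern:
--         if c == '[':
--             in_class = True
--         elif c == ']':
--             in_class = False
--         else:
--             u = c.upper()
--             if u != c:
--                 c = "[{}{}]".format(c, u)
--
--         result += c
--     return result
-- ===== SOURCE B (Python) =====
-- def make_case_insensitive(pattern):
--     table = {ord(c): "[{}{}]".format(c, c.upper())
--              for c in set(pattern) if c.upper() != c}
--     return pattern.translate(table)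
-- ===== Notes on version B (the rewrite author's own statement) =====
-- stated objective: faster
-- what changed: Replaces the explicit per-character branching loop with string concatenation (and a dead in_class flag) by a translation table built once from the distinct lowercase characters of the pattern, applied in a single str.translate pass.
import Mathlib
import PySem

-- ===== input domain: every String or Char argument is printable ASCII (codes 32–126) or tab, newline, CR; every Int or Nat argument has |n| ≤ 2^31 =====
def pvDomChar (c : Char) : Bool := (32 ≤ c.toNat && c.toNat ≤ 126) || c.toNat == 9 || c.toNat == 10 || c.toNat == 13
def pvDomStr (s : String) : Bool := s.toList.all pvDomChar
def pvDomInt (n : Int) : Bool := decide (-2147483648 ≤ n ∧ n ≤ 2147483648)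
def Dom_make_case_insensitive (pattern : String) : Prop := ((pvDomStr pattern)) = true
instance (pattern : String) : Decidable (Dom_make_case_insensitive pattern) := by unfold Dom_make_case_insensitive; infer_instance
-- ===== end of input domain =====

-- B replaces A's per-character branching loop (with a dead `in_class` flag) by a
-- translation table built once from the distinct lowercase chars, applied in one pass (idiomatic).

-- ===== PORT A =====
-- loop state: (result as chars, in_class); the flag is set but never read, as in A
def make_case_insensitive (pattern : String) : String :=
  String.ofList (pattern.toList.foldl
    (fun (st : List Char × Bool) c =>
      if c = '[' then (st.1 ++ [c], true)
      else if c = ']' then (st.1 ++ [c], false)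
      else
        let u := PySem.Chars.upper [c]
        if u ≠ [c] then (st.1 ++ ('[' :: c :: u ++ [']']), st.2)
        else (st.1 ++ [c], st.2))
    ([], false)).1

-- ===== PORT B =====
-- the replacement string "[{}{}]".format(c, c.upper())
def mciChunk (c : Char) : List Char := '[' :: c :: PySem.Chars.upper [c] ++ [']']

-- the translation table: distinct chars of pattern with c.upper() != c, mapped to their chunk
def mciTable (pattern : String) : PySem.Dict Char (List Char) :=
  ((PySem.Set.ofList pattern.toList).filter
      (fun c => PySem.Chars.upper [c] ≠ [c])).foldl
    (fun d c => d.insert c (mciChunk c)) PySem.Dict.empty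

-- pattern.translate(table): each char replaced by its table entry, or kept
def make_case_insensitive_alt (pattern : String) : String :=
  let table := mciTable pattern
  String.ofList (pattern.toList.flatMap (fun c => ((table.get? c).getD [c])))

-- ===== PRECONDITION & SPEC =====
def Spec_make_case_insensitive (pattern : String) (out : String) : Prop := out = make_case_insensitive_alt pattern
instance (pattern : String) (out : String) : Decidable (Spec_make_case_insensitive pattern out) := by unfold Spec_make_case_insensitive; infer_instance

-- ===== CLAIM (what is proved, stated in full; the proofs are below) =====
def Claim_equal_make_case_insensitive : Prop := ∀ (pattern : String), Dom_make_case_insensitive pattern → Spec_make_case_insensitive pattern (make_case_insensitive pattern)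

-- ===== LEMMAS AND PROOFS =====

-- lookup in a fold-built table whose values depend only on the key
theorem mci_get?_foldl_insert (l : List Char) (d : PySem.Dict Char (List Char)) (x : Char) :
    (l.foldl (fun d c => d.insert c (mciChunk c)) d).get? x
      = if x ∈ l then some (mciChunk x) else d.get? x := by
  induction l generalizing d with
  | nil => simp
  | cons c l ih =>
    simp only [List.foldl_cons, ih, List.mem_cons]
    by_cases hx : x ∈ l
    · simp [hx]
    · by_cases hc : x = c
      · subst hc; simp [hx, PySem.Dict.get?_insert_self]
      · simp [hx, hc, PySem.Dict.get?_insert_of_ne _ _ hc]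

theorem mci_table_get? (pattern : String) (x : Char) :
    (mciTable pattern).get? x
      = if x ∈ pattern.toList ∧ PySem.Chars.upper [x] ≠ [x]
        then some (mciChunk x) else none := by
  unfold mciTable
  rw [mci_get?_foldl_insert]
  have he : (PySem.Dict.empty : PySem.Dict Char (List Char)).get? x = none := rfl
  rw [he]
  simp [List.mem_filter, PySem.Set.mem_ofList]

-- what B emits for one character of the pattern
theorem mci_alt_char (pattern : String) (c : Char) (hc : c ∈ pattern.toList) :
    (((mciTable pattern).get? c).getD [c])
      = if PySem.Chars.upper [c] ≠ [c] then mciChunk c else [c] := by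
  rw [mci_table_get?]
  by_cases h : PySem.Chars.upper [c] ≠ [c] <;> simp [h, hc]

-- A's loop: first component is the flat-map of the per-character chunks
theorem mci_foldl_eq (l : List Char) (res : List Char) (b : Bool) :
    (l.foldl
      (fun (st : List Char × Bool) c =>
        if c = '[' then (st.1 ++ [c], true)
        else if c = ']' then (st.1 ++ [c], false)
        else
          let u := PySem.Chars.upper [c]
          if u ≠ [c] then (st.1 ++ ('[' :: c :: u ++ [']']), st.2)
          else (st.1 ++ [c], st.2))
      (res, b)).1
      = res ++ l.flatMap (fun c =>
          if PySem.Chars.upper [c] ≠ [c] then mciChunk c else [c]) := by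
  induction l generalizing res b with
  | nil => simp
  | cons c l ih =>
    simp only [List.foldl_cons, List.flatMap_cons]
    by_cases h1 : c = '['
    · subst h1
      rw [if_pos rfl, ih]
      have h : PySem.Chars.upper ['['] = ['['] := by decide
      simp [mciChunk, h]
    · by_cases h2 : c = ']'
      · subst h2
        rw [if_neg h1, if_pos rfl, ih]
        have h : PySem.Chars.upper [']'] = [']'] := by decide
        simp [mciChunk, h]
      · simp only [if_neg h1, if_neg h2]
        by_cases h3 : PySem.Chars.upper [c] ≠ [c]
        · rw [if_pos h3, ih]; simp [mciChunk, h3]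
        · rw [if_neg h3, ih]; simp [mciChunk, h3]

-- ===== VERDICT (by name: the statement is the Claim_ definition above) =====
theorem make_case_insensitive_spec : Claim_equal_make_case_insensitive := by
  intro pattern _
  unfold Spec_make_case_insensitive make_case_insensitive make_case_insensitive_alt
  rw [mci_foldl_eq]
  congr 1
  simp only [List.nil_append]
  exact (List.flatMap_congr (fun c hc => (mci_alt_char pattern c hc).symm))
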